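-- pv_equiv track=rewrite | github.com/phredmund/AdventofCode2021 | Day_07/main.py | fuel_calc
-- ===== SOURCE A (Python) =====
-- def fuel_calc(x):
--     if x <= 1:
--         return x
--     else:
--         total = x
--         while x > 1:
--             total += (x-1)
--             x -= 1
--         return total
-- ===== SOURCE B (Python) =====
-- def fuel_calc(x):
--     return x * (x + 1) // 2 if x > 1 else x
-- ===== Notes on version B (the rewrite author's own statement) =====
-- stated objective: faster
-- what changed: Replaced the decrementing while-loop accumulation with the closed-form triangular number x*(x+1)//2.
import Mathlib
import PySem

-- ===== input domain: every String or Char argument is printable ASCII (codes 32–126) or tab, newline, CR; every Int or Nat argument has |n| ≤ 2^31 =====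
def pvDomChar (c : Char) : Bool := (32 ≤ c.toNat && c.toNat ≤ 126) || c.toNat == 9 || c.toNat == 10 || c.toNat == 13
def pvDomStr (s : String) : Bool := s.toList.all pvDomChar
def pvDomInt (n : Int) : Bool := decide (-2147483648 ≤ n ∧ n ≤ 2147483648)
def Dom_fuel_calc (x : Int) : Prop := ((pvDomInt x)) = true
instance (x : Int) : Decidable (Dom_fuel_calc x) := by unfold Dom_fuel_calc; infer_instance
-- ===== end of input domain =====

-- B replaces A's decrementing accumulation loop with the closed form x*(x+1)//2 (faster).
-- ===== PORT A =====
-- while x > 1: total += (x-1); x -= 1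
def fuelLoopA (total x : Int) : Int :=
  if h : x > 1 then fuelLoopA (total + (x - 1)) (x - 1) else total
termination_by x.toNat
decreasing_by omega

def fuel_calc (x : Int) : Int :=
  if x ≤ 1 then x else fuelLoopA x x

-- ===== PORT B =====
def fuel_calc_alt (x : Int) : Int :=
  if x > 1 then PySem.Int.floordiv (x * (x + 1)) 2 else x

-- ===== PRECONDITION & SPEC =====
def Spec_fuel_calc (x : Int) (out : Int) : Prop := out = fuel_calc_alt x
instance (x : Int) (out : Int) : Decidable (Spec_fuel_calc x out) := by unfold Spec_fuel_calc; infer_instance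

-- ===== CLAIM (what is proved, stated in full; the proofs are below) =====
def Claim_equal_fuel_calc : Prop := ∀ (x : Int), Dom_fuel_calc x → Spec_fuel_calc x (fuel_calc x)

-- ===== LEMMAS AND PROOFS =====

-- ===== VERDICT (by name: the statement is the Claim_ definition above) =====
-- loop invariant: 2 * fuelLoopA total x = 2 * total + x * x - x for x ≥ 1
theorem fuelLoopA_eq (n : Nat) : ∀ (total x : Int), x.toNat = n → 1 ≤ x →
    2 * fuelLoopA total x = 2 * total + x * x - x := by
  induction n with
  | zero => intro total x hn hx; omega
  | succ k ih =>
    intro total x hn hx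
    rw [fuelLoopA]
    by_cases h : x > 1
    · simp only [h, dif_pos]
      have := ih (total + (x - 1)) (x - 1) (by omega) (by omega)
      nlinarith [this]
    · simp only [h, dif_neg, not_false_iff]
      have : x = 1 := by omega
      subst this; ring

theorem fuel_calc_spec : Claim_equal_fuel_calc := by
  intro x _
  unfold Spec_fuel_calc fuel_calc fuel_calc_alt
  by_cases h : x ≤ 1
  · simp [h, show ¬ x > 1 by omega]
  · have h2 := fuelLoopA_eq x.toNat x x rfl (by omega)
    simp only [h, if_false, show x > 1 by omega, if_true]
    rw [eq_comm, PySem.Int.floordiv_eq_iff_of_pos (by norm_num)]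
    constructor <;> nlinarith
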